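-- pv_equiv track=rewrite | github.com/dkoutavas/drumgen | assembler.py | _validate_physical_constraints
-- ===== SOURCE A (Python) =====
-- _CYMBAL_PRIORITY = {"crash_1": 3, "crash_2": 3, "china": 3, "splash": 2,
--                     "ride": 1, "ride_bell": 1, "hihat_closed": 0, "hihat_open": 0, "hihat_pedal": 0}
--
-- _STICK_PRIORITY = {"snare": 2, "snare_rim": 2, "snare_ghost": 1,
--                    "tom_high": 0, "tom_mid": 0, "tom_low": 0, "tom_floor": 0}
--
-- def _validate_physical_constraints(bar_hits):
--     """Filter hits at each position for limb conflicts.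
--
--     At each (beat, sub) position:
--     - Right hand (cymbals): keep highest priority (crash > ride > hihat)
--     - Left hand: keep highest priority (snare > tom)
--     - No ride+hihat at same position
--     """
--     from collections import defaultdict
--
--     positions = defaultdict(list)
--     for hit in bar_hits:
--         bar, beat, sub, inst, vel = hit
--         positions[(beat, sub)].append(hit)
--
--     filtered = []
--     for pos, hits in positions.items():
--         cymbals = [(h, _CYMBAL_PRIORITY.get(h[3], -1)) for h in hits if h[3] in _CYMBAL_PRIORITY]
--         sticks = [(h, _STICK_PRIORITY.get(h[3], -1)) for h in hits if h[3] in _STICK_PRIORITY]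
--         feet = [h for h in hits if h[3] == "kick" or h[3] == "hihat_pedal"]
--
--         # Keep highest-priority cymbal only
--         if cymbals:
--             best_prio = max(p for _, p in cymbals)
--             best_cymbals = [h for h, p in cymbals if p == best_prio]
--             filtered.append(best_cymbals[0])
--
--         # Keep highest-priority stick hit only
--         if sticks:
--             best_prio = max(p for _, p in sticks)
--             best_sticks = [h for h, p in sticks if p == best_prio]
--             filtered.append(best_sticks[0])
--
--         # Keep all foot hits (kick, hihat_pedal can coexist)
--         filtered.extend(feet)
--
--     return filtered
-- ===== SOURCE B (Python) =====
-- _CYMBAL_PRIORITY = {"crash_1": 3, "crash_2": 3, "china": 3, "splash": 2,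
--                     "ride": 1, "ride_bell": 1, "hihat_closed": 0, "hihat_open": 0, "hihat_pedal": 0}
--
-- _STICK_PRIORITY = {"snare": 2, "snare_rim": 2, "snare_ghost": 1,
--                    "tom_high": 0, "tom_mid": 0, "tom_low": 0, "tom_floor": 0}
--
--
-- def _validate_physical_constraints(bar_hits):
--     """One pass over bar_hits: per (beat, sub) position keep a small running state
--     (best cymbal so far, best stick so far, feet list) instead of grouping all hits
--     and rescanning each group."""
--     states = {}  # (beat, sub) -> (best_cymbal or None, best_stick or None, feet)
--     for hit in bar_hits:
--         bar, beat, sub, inst, vel = hit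
--         key = (beat, sub)
--         best_cym, best_stick, feet = states.get(key, (None, None, []))
--         if inst in _CYMBAL_PRIORITY:
--             p = _CYMBAL_PRIORITY[inst]
--             if best_cym is None or p > best_cym[1]:
--                 best_cym = (hit, p)
--         if inst in _STICK_PRIORITY:
--             p = _STICK_PRIORITY[inst]
--             if best_stick is None or p > best_stick[1]:
--                 best_stick = (hit, p)
--         if inst == "kick" or inst == "hihat_pedal":
--             feet = feet + [hit]
--         states[key] = (best_cym, best_stick, feet)
--
--     out = []
--     for best_cym, best_stick, feet in states.values():
--         if best_cym is not None:
--             out.append(best_cym[0])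
--         if best_stick is not None:
--             out.append(best_stick[0])
--         out.extend(feet)
--     return out
-- ===== Notes on version B (the rewrite author's own statement) =====
-- stated objective: alternative
-- what changed: Instead of grouping all hits into per-position lists and then rescanning each group four times (cymbal filter, max, argmax filter, stick likewise), B makes one streaming pass that keeps per position only a running best-cymbal, best-stick (strict-greater update so the first maximum wins ties) and the feet list, then emits each position's state once.
import Mathlib
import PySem

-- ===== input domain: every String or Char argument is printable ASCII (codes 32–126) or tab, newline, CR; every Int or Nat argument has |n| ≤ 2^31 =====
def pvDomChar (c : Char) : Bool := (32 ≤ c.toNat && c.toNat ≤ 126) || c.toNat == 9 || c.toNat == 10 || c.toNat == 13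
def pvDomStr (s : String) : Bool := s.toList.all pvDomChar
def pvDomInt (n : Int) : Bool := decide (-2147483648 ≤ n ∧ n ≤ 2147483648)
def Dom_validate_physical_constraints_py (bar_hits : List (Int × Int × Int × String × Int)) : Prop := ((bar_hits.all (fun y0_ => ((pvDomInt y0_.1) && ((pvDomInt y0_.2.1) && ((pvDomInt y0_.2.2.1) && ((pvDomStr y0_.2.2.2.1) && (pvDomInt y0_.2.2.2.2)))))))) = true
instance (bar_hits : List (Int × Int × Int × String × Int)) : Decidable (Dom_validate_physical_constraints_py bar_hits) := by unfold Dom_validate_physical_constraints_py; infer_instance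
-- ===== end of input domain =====

-- B replaces A's group-then-rescan (build per-position hit lists, then filter/max/filter each
-- group) by a single streaming pass keeping per position only (best cymbal, best stick, feet);
-- objective: alternative decomposition of the same O(n) task.

abbrev PvHit := Int × Int × Int × String × Int
abbrev PvSt := Option (PvHit × Int) × Option (PvHit × Int) × List PvHit

-- the module-level priority dicts, shared by both Pythons
def pvCymPri : PySem.Dict String Int :=
  PySem.Dict.ofList [("crash_1", 3), ("crash_2", 3), ("china", 3), ("splash", 2),
                     ("ride", 1), ("ride_bell", 1), ("hihat_closed", 0), ("hihat_open", 0), ("hihat_pedal", 0)]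
def pvStickPri : PySem.Dict String Int :=
  PySem.Dict.ofList [("snare", 2), ("snare_rim", 2), ("snare_ghost", 1),
                     ("tom_high", 0), ("tom_mid", 0), ("tom_low", 0), ("tom_floor", 0)]

-- ===== PORT A =====
-- literal port of _validate_physical_constraints: group hits by (beat, sub) in insertion
-- order (defaultdict(list) ≈ modify with default []), then per position filter cymbals/sticks,
-- take the max priority, keep the first hit achieving it (best_cymbals[0] is headI: the
-- filtered list is nonempty exactly when the `if` guard holds), and keep all feet.
def validate_physical_constraints_py (bar_hits : List (Int × Int × Int × String × Int)) : List (Int × Int × Int × String × Int) :=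
  let positions := bar_hits.foldl
    (fun d h => d.modify (h.2.1, h.2.2.1) [] (fun l => l ++ [h])) PySem.Dict.empty
  positions.items.foldl (fun filtered pos =>
    let hits := pos.2
    let cymbals := (hits.filter (fun h => pvCymPri.contains h.2.2.2.1)).map
        (fun h => (h, pvCymPri.getD h.2.2.2.1 (-1)))
    let sticks := (hits.filter (fun h => pvStickPri.contains h.2.2.2.1)).map
        (fun h => (h, pvStickPri.getD h.2.2.2.1 (-1)))
    let feet := hits.filter (fun h => h.2.2.2.1 == "kick" || h.2.2.2.1 == "hihat_pedal")
    let filtered := if cymbals.isEmpty then filtered else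
      let best_prio := (PySem.List.max? (cymbals.map (fun hp => hp.2)) id).getD 0
      let best_cymbals := (cymbals.filter (fun hp => hp.2 == best_prio)).map (fun hp => hp.1)
      filtered ++ [best_cymbals.headI]
    let filtered := if sticks.isEmpty then filtered else
      let best_prio := (PySem.List.max? (sticks.map (fun hp => hp.2)) id).getD 0
      let best_sticks := (sticks.filter (fun hp => hp.2 == best_prio)).map (fun hp => hp.1)
      filtered ++ [best_sticks.headI]
    filtered ++ feet) []

-- ===== PORT B =====
-- per-hit update of one position's running state (best cymbal, best stick, feet) — the loop
-- body of Source B; `p > best[1]` is the strict comparison `hp.2 < p`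
def pvBest (pri : PySem.Dict String Int) (s : Option (PvHit × Int)) (h : PvHit) : Option (PvHit × Int) :=
  if pri.contains h.2.2.2.1 then
    let p := pri.getD h.2.2.2.1 (-1)   -- key is present, so the default is unreachable
    match s with
    | none => some (h, p)
    | some hp => if hp.2 < p then some (h, p) else s
  else s

def pvAltUpdate (st : PvSt) (h : PvHit) : PvSt :=
  (pvBest pvCymPri st.1 h, pvBest pvStickPri st.2.1 h,
   if h.2.2.2.1 == "kick" || h.2.2.2.1 == "hihat_pedal" then st.2.2 ++ [h] else st.2.2)

def validate_physical_constraints_py_alt (bar_hits : List (Int × Int × Int × String × Int)) : List (Int × Int × Int × String × Int) :=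
  let states := bar_hits.foldl
    (fun d h => d.modify (h.2.1, h.2.2.1) (none, none, []) (fun st => pvAltUpdate st h))
    PySem.Dict.empty
  states.items.foldl (fun out kv =>
    let out := match kv.2.1 with | some hp => out ++ [hp.1] | none => out
    let out := match kv.2.2.1 with | some hp => out ++ [hp.1] | none => out
    out ++ kv.2.2.2) []

-- ===== PRECONDITION & SPEC =====
def Spec_validate_physical_constraints_py (bar_hits : List (Int × Int × Int × String × Int)) (out : List (Int × Int × Int × String × Int)) : Prop := out = validate_physical_constraints_py_alt bar_hits
instance (bar_hits : List (Int × Int × Int × String × Int)) (out : List (Int × Int × Int × String × Int)) : Decidable (Spec_validate_physical_constraints_py bar_hits out) := by unfold Spec_validate_physical_constraints_py; infer_instance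

-- ===== CLAIM (what is proved, stated in full; the proofs are below) =====
def Claim_equal_validate_physical_constraints_py : Prop := ∀ (bar_hits : List (Int × Int × Int × String × Int)), Dom_validate_physical_constraints_py bar_hits → Spec_validate_physical_constraints_py bar_hits (validate_physical_constraints_py bar_hits)

-- ===== LEMMAS AND PROOFS =====

-- the step of PySem.List.max? with key (·.2), on (hit, priority) pairs
def pvMStep (acc : Option (PvHit × Int)) (x : PvHit × Int) : Option (PvHit × Int) :=
  match acc with
  | none => some x
  | some m => if m.2 < x.2 then some x else some m

-- B's per-position running fold over hits equals the max?-fold over A's pair list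
theorem pvFoldBest (pri : PySem.Dict String Int) (l : List PvHit) : ∀ s : Option (PvHit × Int),
    l.foldl (pvBest pri) s =
      ((l.filter (fun h => pri.contains h.2.2.2.1)).map
        (fun h => (h, pri.getD h.2.2.2.1 (-1)))).foldl pvMStep s := by
  induction l with
  | nil => intro s; rfl
  | cons h t ih =>
    intro s
    by_cases hm : pri.contains h.2.2.2.1
    · cases s <;> simp [pvBest, pvMStep, hm, ih]
    · simp [pvBest, hm, ih]

theorem pvMaxDef (pairs : List (PvHit × Int)) :
    PySem.List.max? pairs (fun hp => hp.2) = pairs.foldl pvMStep none := by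
  simp only [PySem.List.max?]
  exact PySem.List.foldl_congr_mem pairs _ pvMStep none (fun acc x _ => by cases acc <;> rfl)

theorem pvMaxEq (pri : PySem.Dict String Int) (l : List PvHit) :
    l.foldl (pvBest pri) none =
      PySem.List.max? ((l.filter (fun h => pri.contains h.2.2.2.1)).map
        (fun h => (h, pri.getD h.2.2.2.1 (-1)))) (fun hp => hp.2) := by
  rw [pvFoldBest, pvMaxDef]

theorem pvFoldSome (t : List (PvHit × Int)) : ∀ x, ∃ y, t.foldl pvMStep (some x) = some y := by
  induction t with
  | nil => intro x; exact ⟨x, rfl⟩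
  | cons a t ih =>
    intro x
    show ∃ y, t.foldl pvMStep (pvMStep (some x) a) = some y
    simp only [pvMStep]
    split <;> exact ih _

theorem pvMaxNone (pairs : List (PvHit × Int))
    (h : PySem.List.max? pairs (fun hp => hp.2) = none) : pairs = [] := by
  cases pairs with
  | nil => rfl
  | cons a t =>
    exfalso
    obtain ⟨y, hy⟩ := pvFoldSome t a
    rw [pvMaxDef] at h
    simp only [List.foldl_cons, pvMStep] at h
    rw [hy] at h
    simp at h

-- max? with key (·.2) returns the FIRST pair achieving the maximal priority
theorem pvArgmax : ∀ (pairs : List (PvHit × Int)) (m : PvHit × Int),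
    PySem.List.max? pairs (fun hp => hp.2) = some m →
    PySem.List.max? (pairs.map (fun hp => hp.2)) id = some m.2 ∧
    (pairs.filter (fun hp => hp.2 == m.2)).head? = some m := by
  intro pairs
  induction pairs using List.reverseRecOn with
  | nil => intro m h; exact absurd h (by simp [PySem.List.max?])
  | append_singleton l a ih =>
    intro m hm
    rw [pvMaxDef, List.foldl_append, List.foldl_cons, List.foldl_nil] at hm
    cases l with
    | nil =>
      simp only [List.foldl_nil, pvMStep] at hm
      have := Option.some.inj hm; subst this
      refine ⟨by simp [PySem.List.max?], by simp⟩
    | cons b t =>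
      obtain ⟨y, hy⟩ : ∃ y, (b :: t).foldl pvMStep none = some y := by
        simp only [List.foldl_cons]
        exact pvFoldSome t b
      have hyl : PySem.List.max? (b :: t) (fun hp : PvHit × Int => hp.2) = some y := by
        rw [pvMaxDef]; exact hy
      obtain ⟨ihmap, ihhead⟩ := ih y hyl
      have hbound := PySem.List.max?_isMax hyl
      rw [hy] at hm
      simp only [pvMStep] at hm
      by_cases hlt : y.2 < a.2
      · rw [if_pos hlt] at hm
        have := Option.some.inj hm; subst this
        constructor
        · simp only [PySem.List.max?, List.map_append] at ihmap ⊢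
          rw [List.foldl_append, ihmap]
          simp [hlt]
        · have hnil : (b :: t).filter (fun hp => hp.2 == a.2) = [] := by
            rw [List.filter_eq_nil_iff]
            intro z hz
            have := hbound z hz
            simp only [beq_iff_eq]
            omega
          rw [List.filter_append, hnil, List.nil_append]
          simp
      · rw [if_neg hlt] at hm
        have := Option.some.inj hm; subst this
        constructor
        · simp only [PySem.List.max?, List.map_append] at ihmap ⊢
          rw [List.foldl_append, ihmap]
          simp [hlt]
        · rw [List.filter_append, List.head?_append]
          simp [ihhead]

-- componentwise split of B's state fold
theorem pvSplit (l : List PvHit) : ∀ (a b : Option (PvHit × Int)) (c : List PvHit),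
    l.foldl pvAltUpdate (a, b, c) =
      (l.foldl (pvBest pvCymPri) a, l.foldl (pvBest pvStickPri) b,
       l.foldl (fun acc h => if h.2.2.2.1 == "kick" || h.2.2.2.1 == "hihat_pedal" then acc ++ [h] else acc) c) := by
  induction l with
  | nil => intro a b c; rfl
  | cons h t ih => intro a b c; exact ih _ _ _

-- relate B's state dict to A's position dict: same keys, B's value = fold of A's hit list
def pvG (kv : (Int × Int) × List PvHit) : (Int × Int) × PvSt :=
  (kv.1, kv.2.foldl pvAltUpdate (none, none, []))

theorem pvStepInv (dA : PySem.Dict (Int × Int) (List PvHit)) (dB : PySem.Dict (Int × Int) PvSt)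
    (k : Int × Int) (h : PvHit) (hinv : dB.items = dA.items.map pvG) :
    (dB.modify k (none, none, []) (fun st => pvAltUpdate st h)).items =
      (dA.modify k [] (fun l => l ++ [h])).items.map pvG := by
  have hfind : List.find? (fun p => p.1 == k) (dA.items.map pvG) =
      (List.find? (fun p => p.1 == k) dA.items).map pvG := by
    rw [List.find?_map]; rfl
  have hcont : dB.contains k = dA.contains k := by
    simp only [PySem.Dict.contains, hinv, List.any_map]; rfl
  have hgetD : dB.getD k (none, none, []) = (dA.getD k []).foldl pvAltUpdate (none, none, []) := by
    simp only [PySem.Dict.getD, PySem.Dict.get?, hinv, hfind]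
    cases List.find? (fun p => p.1 == k) dA.items <;> rfl
  simp only [PySem.Dict.modify, PySem.Dict.insert, hcont, hgetD]
  by_cases hc : dA.contains k
  · rw [if_pos hc, if_pos hc]
    simp only [hinv, List.map_map]
    refine List.map_congr_left ?_
    intro p _
    by_cases hpk : p.1 == k
    · simp [Function.comp, hpk, pvG, List.foldl_append]
    · simp [Function.comp, hpk, pvG]
  · rw [if_neg hc, if_neg hc]
    simp [hinv, pvG, List.foldl_append]

theorem pvDictInv : ∀ (l : List PvHit) (dA : PySem.Dict (Int × Int) (List PvHit)) (dB : PySem.Dict (Int × Int) PvSt),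
    dB.items = dA.items.map pvG →
    (l.foldl (fun d h => d.modify (h.2.1, h.2.2.1) (none, none, []) (fun st => pvAltUpdate st h)) dB).items =
      (l.foldl (fun d h => d.modify (h.2.1, h.2.2.1) [] (fun l => l ++ [h])) dA).items.map pvG := by
  intro l
  induction l with
  | nil => intro dA dB hinv; exact hinv
  | cons h t ih =>
    intro dA dB hinv
    exact ih _ _ (pvStepInv dA dB (h.2.1, h.2.2.1) h hinv)

-- ===== VERDICT (by name: the statement is the Claim_ definition above) =====
-- A's per-position "if nonempty: first hit with max priority" equals a match on the first argmax
theorem pvChunkPairs (pairs : List (PvHit × Int)) (acc : List PvHit) :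
    (if pairs.isEmpty then acc
     else acc ++ [((pairs.filter (fun hp => hp.2 ==
         (PySem.List.max? (pairs.map (fun hp => hp.2)) id).getD 0)).map (fun hp => hp.1)).headI])
    = match PySem.List.max? pairs (fun hp => hp.2) with
      | some hp => acc ++ [hp.1]
      | none => acc := by
  cases hmax : PySem.List.max? pairs (fun hp => hp.2) with
  | none =>
    have := pvMaxNone pairs hmax
    subst this; rfl
  | some m =>
    obtain ⟨hmap, hhead⟩ := pvArgmax pairs m hmax
    have hne : pairs ≠ [] := by
      rintro rfl
      simp [PySem.List.max?] at hmax
    rw [if_neg (by simpa [List.isEmpty_iff] using hne), hmap]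
    simp only [Option.getD_some]
    cases hf : pairs.filter (fun hp => hp.2 == m.2) with
    | nil => rw [hf] at hhead; simp at hhead
    | cons x xs =>
      rw [hf] at hhead
      simp only [List.head?_cons] at hhead
      have := Option.some.inj hhead; subst this
      simp

theorem pvPerPos (acc : List PvHit) (kv : (Int × Int) × List PvHit) :
    (fun (filtered : List PvHit) (pos : (Int × Int) × List PvHit) =>
      let hits := pos.2
      let cymbals := (hits.filter (fun h => pvCymPri.contains h.2.2.2.1)).map
          (fun h => (h, pvCymPri.getD h.2.2.2.1 (-1)))
      let sticks := (hits.filter (fun h => pvStickPri.contains h.2.2.2.1)).map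
          (fun h => (h, pvStickPri.getD h.2.2.2.1 (-1)))
      let feet := hits.filter (fun h => h.2.2.2.1 == "kick" || h.2.2.2.1 == "hihat_pedal")
      let filtered := if cymbals.isEmpty then filtered else
        let best_prio := (PySem.List.max? (cymbals.map (fun hp => hp.2)) id).getD 0
        let best_cymbals := (cymbals.filter (fun hp => hp.2 == best_prio)).map (fun hp => hp.1)
        filtered ++ [best_cymbals.headI]
      let filtered := if sticks.isEmpty then filtered else
        let best_prio := (PySem.List.max? (sticks.map (fun hp => hp.2)) id).getD 0
        let best_sticks := (sticks.filter (fun hp => hp.2 == best_prio)).map (fun hp => hp.1)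
        filtered ++ [best_sticks.headI]
      filtered ++ feet) acc kv
    = (fun (out : List PvHit) (kv : (Int × Int) × PvSt) =>
        let out := match kv.2.1 with | some hp => out ++ [hp.1] | none => out
        let out := match kv.2.2.1 with | some hp => out ++ [hp.1] | none => out
        out ++ kv.2.2.2) acc (pvG kv) := by
  obtain ⟨k, hits⟩ := kv
  simp only [pvG, pvSplit]
  have hfeet : hits.foldl (fun acc h =>
      if h.2.2.2.1 == "kick" || h.2.2.2.1 == "hihat_pedal" then acc ++ [h] else acc) [] =
      hits.filter (fun h => h.2.2.2.1 == "kick" || h.2.2.2.1 == "hihat_pedal") := by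
    have := PySem.List.foldl_append_if
      (fun h : PvHit => h.2.2.2.1 == "kick" || h.2.2.2.1 == "hihat_pedal") id hits []
    simpa using this
  simp only [hfeet, pvMaxEq pvCymPri hits, pvMaxEq pvStickPri hits]
  rw [← pvChunkPairs, ← pvChunkPairs]

-- ===== VERDICT (by name: the statement is the Claim_ definition above) =====
theorem validate_physical_constraints_py_spec : Claim_equal_validate_physical_constraints_py := by
  intro bar_hits _
  unfold Spec_validate_physical_constraints_py
  unfold validate_physical_constraints_py validate_physical_constraints_py_alt
  dsimp only
  rw [pvDictInv bar_hits PySem.Dict.empty PySem.Dict.empty rfl, List.foldl_map]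
  exact PySem.List.foldl_congr_mem _ _ _ [] (fun acc x _ => pvPerPos acc x)
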